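-- pv_equiv track=rewrite | github.com/TencentBlueKing/bk-bcs | bcs-ui/backend/uniapps/application/views.py | compose_status_count_data
-- ===== SOURCE A (Python) =====
-- def compose_status_count_data(muster_tmpl_map, tmpl_create_error, inst_status):
--     """组装数量"""
--     ret_data = {}
--     for key, val in muster_tmpl_map.items():
--         ret_data[key] = {"total_num": val, "error_num": 0}
--         if key in tmpl_create_error:
--             ret_data[key]["error_num"] += tmpl_create_error[key]
--
--         if key in inst_status:
--             ret_data[key]["error_num"] += inst_status[key]
--     return ret_data
-- ===== SOURCE B (Python) =====
-- def compose_status_count_data(muster_tmpl_map, tmpl_create_error, inst_status):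
--     """组装数量 — three separate passes: build the base table, then fold each error source into it"""
--     ret_data = {key: {"total_num": val, "error_num": 0} for key, val in muster_tmpl_map.items()}
--     for key, val in tmpl_create_error.items():
--         if key in ret_data:
--             ret_data[key]["error_num"] += val
--     for key, val in inst_status.items():
--         if key in ret_data:
--             ret_data[key]["error_num"] += val
--     return ret_data
-- ===== Notes on version B (the rewrite author's own statement) =====
-- stated objective: alternative
-- what changed: Instead of one pass over muster_tmpl_map that probes both error dicts per key, B builds the base result by a comprehension over muster_tmpl_map and then makes one guarded pass over each of tmpl_create_error and inst_status, adding each value into the existing entry's error_num.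
import Mathlib
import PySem

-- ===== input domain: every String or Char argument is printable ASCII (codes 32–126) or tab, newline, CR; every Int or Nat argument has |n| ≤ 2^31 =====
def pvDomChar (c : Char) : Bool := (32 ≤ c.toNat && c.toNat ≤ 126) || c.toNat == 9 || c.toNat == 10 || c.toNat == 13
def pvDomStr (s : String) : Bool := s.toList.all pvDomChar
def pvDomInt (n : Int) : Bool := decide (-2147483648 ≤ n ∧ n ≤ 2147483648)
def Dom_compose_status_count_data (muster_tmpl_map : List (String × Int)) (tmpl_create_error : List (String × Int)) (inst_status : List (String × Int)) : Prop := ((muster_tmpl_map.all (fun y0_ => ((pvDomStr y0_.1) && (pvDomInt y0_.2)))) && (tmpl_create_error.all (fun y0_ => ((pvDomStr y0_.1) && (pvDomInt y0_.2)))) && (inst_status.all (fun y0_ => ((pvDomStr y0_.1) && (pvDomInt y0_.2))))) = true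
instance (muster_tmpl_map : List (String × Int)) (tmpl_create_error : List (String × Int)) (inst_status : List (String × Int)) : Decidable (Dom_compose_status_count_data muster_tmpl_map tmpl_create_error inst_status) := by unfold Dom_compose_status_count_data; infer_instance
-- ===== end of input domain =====

-- B replaces A's single pass (which probes both error dicts per template key) by a base
-- comprehension over muster_tmpl_map followed by one guarded accumulation pass over each
-- error dict; same cost, different decomposition ("alternative"). Return values only.

-- ===== PORT A =====
-- A's loop body builds the fresh entry {"total_num": val, "error_num": 0} and then mutates
-- its "error_num" in place; the port applies the two guarded "+=" updates to the fresh entry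
-- before the single insert — the same values reach ret_data (the entry was just inserted at key).
def pvEntryA (tce ist : PySem.Dict String Int) (k : String) (v : Int) : PySem.Dict String Int :=
  let e : PySem.Dict String Int := (PySem.Dict.empty.insert "total_num" v).insert "error_num" 0
  let e := if tce.contains k then e.insert "error_num" (e.getD "error_num" 0 + tce.getD k 0) else e
  let e := if ist.contains k then e.insert "error_num" (e.getD "error_num" 0 + ist.getD k 0) else e
  e

def compose_status_count_data (muster_tmpl_map : List (String × Int)) (tmpl_create_error : List (String × Int)) (inst_status : List (String × Int)) : List (String × List (String × Int)) :=
  let tce := PySem.Dict.ofList tmpl_create_error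
  let ist := PySem.Dict.ofList inst_status
  let ret := (PySem.Dict.ofList muster_tmpl_map).items.foldl
    (fun ret p => ret.insert p.1 (pvEntryA tce ist p.1 p.2)) PySem.Dict.empty
  ret.items.map (fun p => (p.1, p.2.items))

-- ===== PORT B =====
-- ret_data[key]["error_num"] += c
def pvBump (e : PySem.Dict String Int) (c : Int) : PySem.Dict String Int :=
  e.insert "error_num" (e.getD "error_num" 0 + c)

-- one pass of B: for key, val in src: if key in ret_data: ret_data[key]["error_num"] += val
def pvAddPass (r : PySem.Dict String (PySem.Dict String Int)) (src : List (String × Int)) : PySem.Dict String (PySem.Dict String Int) :=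
  src.foldl (fun r p => if r.contains p.1 then r.modify p.1 PySem.Dict.empty (fun e => pvBump e p.2) else r) r

def compose_status_count_data_alt (muster_tmpl_map : List (String × Int)) (tmpl_create_error : List (String × Int)) (inst_status : List (String × Int)) : List (String × List (String × Int)) :=
  let base := (PySem.Dict.ofList muster_tmpl_map).items.foldl
    (fun r p => r.insert p.1 ((PySem.Dict.empty.insert "total_num" p.2).insert "error_num" (0 : Int))) PySem.Dict.empty
  let r1 := pvAddPass base (PySem.Dict.ofList tmpl_create_error).items
  let r2 := pvAddPass r1 (PySem.Dict.ofList inst_status).items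
  r2.items.map (fun p => (p.1, p.2.items))

-- ===== PRECONDITION & SPEC =====
def Spec_compose_status_count_data (muster_tmpl_map : List (String × Int)) (tmpl_create_error : List (String × Int)) (inst_status : List (String × Int)) (out : List (String × List (String × Int))) : Prop := out = compose_status_count_data_alt muster_tmpl_map tmpl_create_error inst_status
instance (muster_tmpl_map : List (String × Int)) (tmpl_create_error : List (String × Int)) (inst_status : List (String × Int)) (out : List (String × List (String × Int))) : Decidable (Spec_compose_status_count_data muster_tmpl_map tmpl_create_error inst_status out) := by unfold Spec_compose_status_count_data; infer_instance

-- ===== CLAIM (what is proved, stated in full; the proofs are below) =====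
def Claim_equal_compose_status_count_data : Prop := ∀ (muster_tmpl_map : List (String × Int)) (tmpl_create_error : List (String × Int)) (inst_status : List (String × Int)), Dom_compose_status_count_data muster_tmpl_map tmpl_create_error inst_status → Spec_compose_status_count_data muster_tmpl_map tmpl_create_error inst_status (compose_status_count_data muster_tmpl_map tmpl_create_error inst_status)

-- ===== LEMMAS AND PROOFS =====

-- the per-key effect of one accumulation pass
def pvApplyAll (k : String) (e : PySem.Dict String Int) (tl : List (String × Int)) : PySem.Dict String Int :=
  tl.foldl (fun e p => if p.1 = k then pvBump e p.2 else e) e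

-- B's step function is a guarded overwrite-insert
theorem pvStep_eq (d : PySem.Dict String (PySem.Dict String Int)) (p : String × Int) :
    (if d.contains p.1 then d.modify p.1 PySem.Dict.empty (fun e => pvBump e p.2) else d)
      = if d.contains p.1 then d.insert p.1 (pvBump (d.getD p.1 PySem.Dict.empty) p.2) else d := rfl

-- one step of a pass acts pointwise on the items list
theorem pvStep_items (d : PySem.Dict String (PySem.Dict String Int)) (p : String × Int)
    (hnd : d.keys.Nodup) :
    (if d.contains p.1 then d.modify p.1 PySem.Dict.empty (fun e => pvBump e p.2) else d).items
      = d.items.map (fun q => if p.1 = q.1 then (q.1, pvBump q.2 p.2) else q) := by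
  rw [pvStep_eq]
  by_cases hc : d.contains p.1 = true
  · rw [if_pos hc, PySem.Dict.items_insert_of_contains d _ hc]
    refine List.map_congr_left (fun q hq => ?_)
    by_cases he : q.1 = p.1
    · have hv : d.getD p.1 PySem.Dict.empty = q.2 := by
        have hq' : (p.1, q.2) ∈ d.items := by rw [← he]; exact hq
        exact PySem.Dict.getD_of_mem_items d hq' hnd _
      simp [he, hv]
    · simp only [show (q.1 == p.1) = false by simpa using he, Bool.false_eq_true, if_false]
      rw [if_neg (fun h : p.1 = q.1 => he h.symm)]
  · rw [if_neg hc]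
    have h1 : ∀ q ∈ d.items, (if p.1 = q.1 then (q.1, pvBump q.2 p.2) else q) = q := by
      intro q hq
      have hk : q.1 ∈ d.keys := PySem.Dict.mem_keys_of_mem_items d hq
      have : p.1 ≠ q.1 := by
        intro h; exact hc ((PySem.Dict.contains_iff_mem_keys d p.1).mpr (h ▸ hk))
      simp [this]
    calc d.items = d.items.map (fun q => q) := (List.map_id' _).symm
      _ = _ := (List.map_congr_left (fun q hq => (h1 q hq).symm))

-- keys are untouched by one step
theorem pvStep_keys (d : PySem.Dict String (PySem.Dict String Int)) (p : String × Int)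
    (hnd : d.keys.Nodup) :
    (if d.contains p.1 then d.modify p.1 PySem.Dict.empty (fun e => pvBump e p.2) else d).keys
      = d.keys := by
  have := pvStep_items d p hnd
  simp only [PySem.Dict.keys, this, List.map_map]
  refine List.map_congr_left (fun q _ => ?_)
  by_cases he : p.1 = q.1 <;> simp [he]

-- a whole pass acts pointwise on the items list
theorem pvAddPass_items (tl : List (String × Int)) (d : PySem.Dict String (PySem.Dict String Int))
    (hnd : d.keys.Nodup) :
    (pvAddPass d tl).items = d.items.map (fun q => (q.1, pvApplyAll q.1 q.2 tl)) := by
  induction tl generalizing d with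
  | nil => simp [pvAddPass, pvApplyAll]
  | cons p tl ih =>
    have hstep := pvStep_items d p hnd
    have hkeys := pvStep_keys d p hnd
    have hnd' : (if d.contains p.1 then d.modify p.1 PySem.Dict.empty (fun e => pvBump e p.2) else d).keys.Nodup := by
      rw [hkeys]; exact hnd
    have : pvAddPass d (p :: tl)
        = pvAddPass (if d.contains p.1 then d.modify p.1 PySem.Dict.empty (fun e => pvBump e p.2) else d) tl := by
      simp [pvAddPass]
    rw [this, ih _ hnd', hstep, List.map_map]
    refine List.map_congr_left (fun q _ => ?_)
    by_cases he : p.1 = q.1 <;> simp [pvApplyAll, he]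

-- per-key effect of a pass over a dict's items = A's guarded single lookup
theorem pvApplyAll_eq (t : PySem.Dict String Int) (k : String) (e : PySem.Dict String Int)
    (hnd : t.keys.Nodup) :
    pvApplyAll k e t.items = if t.contains k then pvBump e (t.getD k 0) else e := by
  obtain ⟨tl⟩ := t
  induction tl generalizing e with
  | nil => simp [pvApplyAll, PySem.Dict.contains]
  | cons a tl ih =>
    have hnd' : (PySem.Dict.mk tl).keys.Nodup := by
      simpa [PySem.Dict.keys] using hnd.of_cons
    by_cases he : a.1 = k
    · have hnotin : k ∉ tl.map (fun x : String × Int => x.1) := by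
        have h := hnd
        simp only [PySem.Dict.keys, List.map_cons, List.nodup_cons] at h
        rw [← he]
        exact h.1
      have hcontra : (PySem.Dict.mk tl).contains k = false := by
        rw [← Bool.not_eq_true]
        intro h
        exact hnotin (by simpa [PySem.Dict.keys] using (PySem.Dict.contains_iff_mem_keys _ _).mp h)
      have h1 : pvApplyAll k e ((PySem.Dict.mk (a :: tl)).items) = pvApplyAll k (pvBump e a.2) (PySem.Dict.mk tl).items := by
        simp [pvApplyAll, he]
      rw [h1, ih _ hnd', hcontra]
      have hc2 : (PySem.Dict.mk (a :: tl)).contains k = true := by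
        apply (PySem.Dict.contains_iff_mem_keys _ k).mpr
        simp [PySem.Dict.keys, ← he]
      have hg : (PySem.Dict.mk (a :: tl)).getD k 0 = a.2 := by
        rw [PySem.Dict.getD_eq_get?_getD, PySem.Dict.get?_mk_cons]
        simp [he]
      simp [hc2, hg]
    · have h1 : pvApplyAll k e ((PySem.Dict.mk (a :: tl)).items) = pvApplyAll k e (PySem.Dict.mk tl).items := by
        simp [pvApplyAll, he]
      rw [h1, ih _ hnd']
      have hc : (PySem.Dict.mk (a :: tl)).contains k = (PySem.Dict.mk tl).contains k := by
        rw [PySem.Dict.contains_eq_isSome_get?, PySem.Dict.contains_eq_isSome_get?, PySem.Dict.get?_mk_cons]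
        simp [he]
      have hg : (PySem.Dict.mk (a :: tl)).getD k 0 = (PySem.Dict.mk tl).getD k 0 := by
        rw [PySem.Dict.getD_eq_get?_getD, PySem.Dict.getD_eq_get?_getD, PySem.Dict.get?_mk_cons]
        simp [he]
      rw [hc, hg]

-- ===== VERDICT (by name: the statement is the Claim_ definition above) =====
theorem compose_status_count_data_spec : Claim_equal_compose_status_count_data := by
  intro m t i _
  unfold Spec_compose_status_count_data
  unfold compose_status_count_data compose_status_count_data_alt
  have hmnd := PySem.Dict.nodup_keys_ofList (κ := String) (ν := Int) m
  have htnd := PySem.Dict.nodup_keys_ofList (κ := String) (ν := Int) t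
  have hind := PySem.Dict.nodup_keys_ofList (κ := String) (ν := Int) i
  set tce := PySem.Dict.ofList t with htce
  set ist := PySem.Dict.ofList i with hist
  set mi := (PySem.Dict.ofList m).items with hmi
  have hminodup : (mi.map Prod.fst).Nodup := by
    simpa [PySem.Dict.keys] using hmnd
  -- A's fold over fresh keys:
  have hA : ((mi.foldl (fun ret p => ret.insert p.1 (pvEntryA tce ist p.1 p.2)) PySem.Dict.empty)).items
      = mi.map (fun p => (p.1, pvEntryA tce ist p.1 p.2)) := by
    have := PySem.Dict.items_foldl_insert_fresh (l := mi) (k := Prod.fst)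
      (v := fun p => pvEntryA tce ist p.1 p.2) (d := PySem.Dict.empty)
      (by intro a _; simp) hminodup
    simpa using this
  -- B's base fold:
  have hB0 : ((mi.foldl (fun r p => r.insert p.1 ((PySem.Dict.empty.insert "total_num" p.2).insert "error_num" (0 : Int))) PySem.Dict.empty)).items
      = mi.map (fun p => (p.1, (PySem.Dict.empty.insert "total_num" p.2).insert "error_num" (0 : Int))) := by
    have := PySem.Dict.items_foldl_insert_fresh (l := mi) (k := Prod.fst)
      (v := fun p => (PySem.Dict.empty.insert "total_num" p.2).insert "error_num" (0 : Int)) (d := PySem.Dict.empty)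
      (by intro a _; simp) hminodup
    simpa using this
  set base := mi.foldl (fun r p => r.insert p.1 ((PySem.Dict.empty.insert "total_num" p.2).insert "error_num" (0 : Int))) PySem.Dict.empty with hbase
  have hbnd : base.keys.Nodup := by
    simp only [PySem.Dict.keys, hB0, List.map_map]
    simpa using hminodup
  have h1 : (pvAddPass base tce.items).items
      = mi.map (fun p => (p.1, pvApplyAll p.1 ((PySem.Dict.empty.insert "total_num" p.2).insert "error_num" (0 : Int)) tce.items)) := by
    rw [pvAddPass_items _ _ hbnd, hB0, List.map_map]
    rfl
  have h1nd : (pvAddPass base tce.items).keys.Nodup := by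
    simp only [PySem.Dict.keys, h1, List.map_map]
    simpa using hminodup
  have h2 : (pvAddPass (pvAddPass base tce.items) ist.items).items
      = mi.map (fun p => (p.1, pvApplyAll p.1 (pvApplyAll p.1 ((PySem.Dict.empty.insert "total_num" p.2).insert "error_num" (0 : Int)) tce.items) ist.items)) := by
    rw [pvAddPass_items _ _ h1nd, h1, List.map_map]
    rfl
  have key : ∀ (k : String) (v : Int), pvEntryA tce ist k v
      = pvApplyAll k (pvApplyAll k ((PySem.Dict.empty.insert "total_num" v).insert "error_num" (0 : Int)) tce.items) ist.items := by
    intro k v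
    rw [pvApplyAll_eq ist k (pvApplyAll k ((PySem.Dict.empty.insert "total_num" v).insert "error_num" (0 : Int)) tce.items) hind,
      pvApplyAll_eq tce k ((PySem.Dict.empty.insert "total_num" v).insert "error_num" (0 : Int)) htnd]
    unfold pvEntryA pvBump
    by_cases hc1 : tce.contains k = true <;> by_cases hc2 : ist.contains k = true <;>
      simp [hc1, hc2]
  simp only [hA, h2, List.map_map]
  refine List.map_congr_left (fun p _ => ?_)
  simp only [Function.comp_apply, key]
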